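-- pv_equiv track=rewrite | github.com/polirritmico/codesignal_solutions | Python/phoneCall.py | solution
-- ===== SOURCE A (Python) =====
-- def solution(min1, min2_10, min11, money):
--     current_rate = min1
--     call = 0
--     while True:
--         money -= current_rate
--         if money < 0:
--             return call
--         call += 1
--
--         if call == 1:
--             current_rate = min2_10
--         if call == 10:
--             current_rate = min11
-- ===== SOURCE B (Python) =====
-- def solution(min1, min2_10, min11, money):
--     money -= min1
--     if money < 0:
--         return 0
--     if min2_10 > 0 and money < 9 * min2_10:
--         return 1 + money // min2_10
--     return 10 + (money - 9 * min2_10) // min11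
-- ===== Notes on version B (the rewrite author's own statement) =====
-- stated objective: faster
-- what changed: Replaced the minute-by-minute subtraction loop with closed-form floor-division arithmetic over the three rate phases.
import Mathlib
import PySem

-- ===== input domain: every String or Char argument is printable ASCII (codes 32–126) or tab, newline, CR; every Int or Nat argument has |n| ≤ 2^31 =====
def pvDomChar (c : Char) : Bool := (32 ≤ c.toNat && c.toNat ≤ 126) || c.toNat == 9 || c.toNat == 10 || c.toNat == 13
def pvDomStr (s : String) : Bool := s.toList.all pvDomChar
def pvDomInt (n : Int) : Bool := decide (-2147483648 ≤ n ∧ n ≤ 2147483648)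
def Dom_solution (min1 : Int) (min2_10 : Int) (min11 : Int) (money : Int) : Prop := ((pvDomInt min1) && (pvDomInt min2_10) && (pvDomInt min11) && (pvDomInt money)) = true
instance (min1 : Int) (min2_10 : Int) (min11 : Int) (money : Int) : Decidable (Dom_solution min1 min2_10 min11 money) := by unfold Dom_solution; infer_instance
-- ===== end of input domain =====

-- B replaces A's minute-by-minute subtraction loop by closed-form floor-division arithmetic over the three rate phases (asymptotically faster).


-- ===== PORT A =====
-- A's 'while True' loop; the fuel only makes it total (it is never exhausted on Pre_ inputs,
-- where the loop terminates within that many iterations).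
def solutionLoop : Nat → Int → Int → Int → Int → Int → Int
  | 0, _, _, _, _, call => call
  | fuel+1, min2_10, min11, rate, money, call =>
    if money - rate < 0 then call
    else solutionLoop fuel min2_10 min11
      (if call + 1 = 10 then min11 else if call + 1 = 1 then min2_10 else rate)
      (money - rate) (call + 1)

def solution (min1 : Int) (min2_10 : Int) (min11 : Int) (money : Int) : Int :=
  solutionLoop (money.toNat + min1.natAbs + 9 * min2_10.natAbs + 12) min2_10 min11 min1 money 0

-- ===== PORT B =====
def solution_alt (min1 : Int) (min2_10 : Int) (min11 : Int) (money : Int) : Int :=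
  let m := money - min1
  if m < 0 then 0
  else if 0 < min2_10 ∧ m < 9 * min2_10 then 1 + PySem.Int.floordiv m min2_10
  else 10 + PySem.Int.floordiv (m - 9 * min2_10) min11

-- ===== PRECONDITION & SPEC =====
-- Pre_ excludes exactly the inputs on which A's loop never returns (diverges): those where the
-- first ten minutes are affordable but the tier-3 rate min11 is ≤ 0, so money never goes negative.
def Pre_solution (min1 : Int) (min2_10 : Int) (min11 : Int) (money : Int) : Prop :=
  0 < min11 ∨ money - min1 < 0 ∨ money - min1 - 9 * min2_10 < 0
instance (min1 : Int) (min2_10 : Int) (min11 : Int) (money : Int) : Decidable (Pre_solution min1 min2_10 min11 money) := by unfold Pre_solution; infer_instance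
def pvWitness_solution : Int × Int × Int × Int := (3, 1, 2, 20)

def Spec_solution (min1 : Int) (min2_10 : Int) (min11 : Int) (money : Int) (out : Int) : Prop := out = solution_alt min1 min2_10 min11 money
instance (min1 : Int) (min2_10 : Int) (min11 : Int) (money : Int) (out : Int) : Decidable (Spec_solution min1 min2_10 min11 money out) := by unfold Spec_solution; infer_instance

-- ===== CLAIM (what is proved, stated in full; the proofs are below) =====
def Claim_equal_solution : Prop := ∀ (min1 : Int) (min2_10 : Int) (min11 : Int) (money : Int), Dom_solution min1 min2_10 min11 money → Pre_solution min1 min2_10 min11 money → Spec_solution min1 min2_10 min11 money (solution min1 min2_10 min11 money)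

-- ===== LEMMAS AND PROOFS =====

-- In phase 3 (call ≥ 10, rate = min11 > 0, money ≥ 0) the loop returns call + money // min11.
theorem solutionLoop_phase3 (min2_10 min11 : Int) (h11 : 0 < min11) :
    ∀ (fuel : Nat) (money call : Int), 0 ≤ money → money.toNat < fuel → 10 ≤ call →
    solutionLoop fuel min2_10 min11 min11 money call = call + PySem.Int.floordiv money min11 := by
  intro fuel
  induction fuel with
  | zero => intro money call hm hf _; omega
  | succ n ih =>
    intro money call hm hf hc
    rw [solutionLoop]
    by_cases hneg : money - min11 < 0
    · rw [if_pos hneg]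
      have : PySem.Int.floordiv money min11 = 0 := by
        rw [PySem.Int.floordiv_eq_iff_of_pos h11]; constructor <;> omega
      omega
    · rw [if_neg hneg]
      have h10 : ¬ (call + 1 = 10) := by omega
      have h1 : ¬ (call + 1 = 1) := by omega
      rw [if_neg h10, if_neg h1]
      rw [ih (money - min11) (call + 1) (by omega) (by omega) (by omega)]
      have : PySem.Int.floordiv (money - min11) min11 = PySem.Int.floordiv money min11 - 1 := by
        rw [PySem.Int.floordiv_eq_iff_of_pos h11]
        have h : PySem.Int.floordiv money min11 * min11 ≤ money ∧
            money < (PySem.Int.floordiv money min11 + 1) * min11 :=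
          (PySem.Int.floordiv_eq_iff_of_pos h11).mp rfl
        constructor <;> nlinarith [h.1, h.2]
      omega

-- floor division pinned by its bracket (positive divisor)
theorem floordiv_pin (a b q : Int) (hb : 0 < b) (h1 : q * b ≤ a) (h2 : a < (q + 1) * b) :
    PySem.Int.floordiv a b = q := by
  rw [PySem.Int.floordiv_eq_iff_of_pos hb]; exact ⟨h1, h2⟩

-- ===== VERDICT (by name: the statement is the Claim_ definition above) =====
set_option maxHeartbeats 1000000 in
theorem solution_spec : Claim_equal_solution := by
  intro min1 min2_10 min11 money _ hpre
  unfold Spec_solution solution solution_alt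
  rw [show money.toNat + min1.natAbs + 9 * min2_10.natAbs + 12
        = (money.toNat + min1.natAbs + 9 * min2_10.natAbs + 2) + 10 by omega]
  set F := money.toNat + min1.natAbs + 9 * min2_10.natAbs + 2 with hF
  simp only [solutionLoop]
  norm_num
  split_ifs <;> try omega
  -- the nine phase-2 return values: pin money // min2_10 by its bracket
  all_goals try first | (have h := floordiv_pin (money - min1) min2_10 0 (by omega) (by omega) (by omega); omega) | (have h := floordiv_pin (money - min1) min2_10 1 (by omega) (by omega) (by omega); omega) | (have h := floordiv_pin (money - min1) min2_10 2 (by omega) (by omega) (by omega); omega) | (have h := floordiv_pin (money - min1) min2_10 3 (by omega) (by omega) (by omega); omega) | (have h := floordiv_pin (money - min1) min2_10 4 (by omega) (by omega) (by omega); omega) | (have h := floordiv_pin (money - min1) min2_10 5 (by omega) (by omega) (by omega); omega) | (have h := floordiv_pin (money - min1) min2_10 6 (by omega) (by omega) (by omega); omega) | (have h := floordiv_pin (money - min1) min2_10 7 (by omega) (by omega) (by omega); omega) | (have h := floordiv_pin (money - min1) min2_10 8 (by omega) (by omega) (by omega); omega)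
  -- the phase-3 tail: apply the closed form of the remaining loop
  all_goals
    rw [show money - min1 - min2_10 - min2_10 - min2_10 - min2_10 - min2_10 - min2_10 - min2_10 -
          min2_10 - min2_10 = money - min1 - 9 * min2_10 from by ring]
  all_goals
    have h11 : 0 < min11 := by unfold Pre_solution at hpre; omega
  all_goals
    rw [solutionLoop_phase3 min2_10 min11 h11 F (money - min1 - 9 * min2_10) 10 (by omega)
      (by omega) (by omega)]
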